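-- pv_equiv track=rewrite | github.com/trefftzc/partition | sequentialVersionPython/sequentialPartition.py | evaluatePartition
-- ===== SOURCE A (Python) =====
-- def evaluatePartition(  value,  n, array) :
--    sum0s = 0
--    sum1s = 0
--    mask = 1
--    for i in range(0,n):
--      if ((mask & value) != 0):
--        sum1s = sum1s + array[i]
--      else:
--        sum0s = sum0s + array[i]
--      mask = mask * 2
--
--    if (sum0s == sum1s):
--      return 1
--    else:
--      return 0
-- ===== SOURCE B (Python) =====
-- def evaluatePartition(value, n, array):
--     if n <= 0:
--         return 1
--     d = -sum(array[:n])
--     v = value % (1 << n)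
--     while v:
--         k = v.bit_length() - 1
--         d += 2 * array[k]
--         v -= 1 << k
--     return 1 if d == 0 else 0
-- ===== Notes on version B (the rewrite author's own statement) =====
-- stated objective: faster
-- what changed: Instead of scanning all n indices with two branch-updated accumulators and a doubled mask, B takes the whole sum with one bulk slice sum, reduces value mod 2^n, and then loops only over the SET BITS of that number (peeling the highest bit via bit_length), maintaining the single signed quantity d = 2*ones - total and testing d == 0.
import Mathlib
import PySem

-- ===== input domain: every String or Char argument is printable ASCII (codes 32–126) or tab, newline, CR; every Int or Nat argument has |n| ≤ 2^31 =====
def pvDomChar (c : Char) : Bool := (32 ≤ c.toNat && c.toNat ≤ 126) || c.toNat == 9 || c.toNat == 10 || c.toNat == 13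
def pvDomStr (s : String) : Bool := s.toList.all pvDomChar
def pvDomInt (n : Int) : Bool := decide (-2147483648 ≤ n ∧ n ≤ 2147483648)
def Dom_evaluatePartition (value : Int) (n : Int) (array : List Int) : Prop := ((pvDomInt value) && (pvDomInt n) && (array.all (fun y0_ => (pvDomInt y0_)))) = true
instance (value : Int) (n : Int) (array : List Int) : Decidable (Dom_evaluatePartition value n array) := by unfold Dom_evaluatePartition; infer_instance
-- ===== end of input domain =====

-- B replaces A's n-step index scan (two branch-updated accumulators plus a doubled mask) by a
-- sparse walk over the SET BITS of value mod 2^n only, peeling the highest bit with bit_length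
-- and tracking the single signed quantity 2*ones - total: an alternative algorithm, O(len + popcount).

-- ===== PORT A =====
-- one loop iteration of A: state is (sum0s, sum1s, mask)
def stepA (value : Int) (array : List Int) (s : Int × Int × Int) (i : Int) : Int × Int × Int :=
  if PySem.Int.band s.2.2 value ≠ 0 then
    (s.1, s.2.1 + PySem.List.pyGetD array i 0, s.2.2 * 2)
  else
    (s.1 + PySem.List.pyGetD array i 0, s.2.1, s.2.2 * 2)

def evaluatePartition (value : Int) (n : Int) (array : List Int) : Int :=
  let st := (PySem.List.pyRange 0 n 1).foldl (stepA value array) (0, 0, 1)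
  if st.1 = st.2.1 then 1 else 0

-- ===== PORT B =====
-- Python's loop variable v is nonnegative (result of % with a positive modulus), so it is modeled
-- as a Nat; the loop peels the highest set bit k = v.bit_length()-1 and adds 2*array[k] to d.
-- array[k] is ported as pyGetD with default 0: inside Pre_ the index k < n ≤ len is always in range.
def bloopB (array : List Int) (v : Nat) (d : Int) : Int :=
  if h : v = 0 then d
  else
    let k := PySem.Int.bitLength (v : Int) - 1
    bloopB array (v - 2 ^ k) (d + 2 * PySem.List.pyGetD array (k : Int) 0)
termination_by v
decreasing_by exact Nat.sub_lt (Nat.pos_of_ne_zero h) (Nat.two_pow_pos _)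

def evaluatePartition_alt (value : Int) (n : Int) (array : List Int) : Int :=
  if n ≤ 0 then 1
  else
    let d := -(PySem.List.slice array none (some n)).sum
    let v := (PySem.Int.mod value ((1 : Int) <<< n.toNat)).toNat
    if bloopB array v d = 0 then 1 else 0

-- ===== PRECONDITION & SPEC =====
-- Pre_ excludes exactly the inputs where A raises IndexError: n exceeding the array length.
def Pre_evaluatePartition (value : Int) (n : Int) (array : List Int) : Prop :=
  n ≤ (array.length : Int)
instance (value : Int) (n : Int) (array : List Int) : Decidable (Pre_evaluatePartition value n array) := by unfold Pre_evaluatePartition; infer_instance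

def pvWitness_evaluatePartition : Int × Int × List Int := (5, 3, [1, 2, 3])

def Spec_evaluatePartition (value : Int) (n : Int) (array : List Int) (out : Int) : Prop := out = evaluatePartition_alt value n array
instance (value : Int) (n : Int) (array : List Int) (out : Int) : Decidable (Spec_evaluatePartition value n array out) := by unfold Spec_evaluatePartition; infer_instance

-- ===== CLAIM (what is proved, stated in full; the proofs are below) =====
def Claim_equal_evaluatePartition : Prop := ∀ (value : Int) (n : Int) (array : List Int), Dom_evaluatePartition value n array → Pre_evaluatePartition value n array → Spec_evaluatePartition value n array (evaluatePartition value n array)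

-- ===== LEMMAS AND PROOFS =====

-- invariant of A's loop over range(m): state is (zero-sum, one-sum, 2^m)
lemma foldA_range (value : Int) (array : List Int) (m : Nat) :
    (List.map (fun k : Nat => ((k : Int))) (List.range m)).foldl (stepA value array) (0, 0, 1) =
      (((List.range m).map (fun i : Nat => if PySem.Int.band ((2 : Int) ^ i) value = 0 then PySem.List.pyGetD array (i : Int) 0 else 0)).sum,
       ((List.range m).map (fun i : Nat => if PySem.Int.band ((2 : Int) ^ i) value = 0 then 0 else PySem.List.pyGetD array (i : Int) 0)).sum,
       (2 : Int) ^ m) := by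
  induction m with
  | zero => simp
  | succ m ih =>
    rw [List.range_succ]
    simp only [List.map_append, List.foldl_append, ih, List.map_cons, List.map_nil,
      List.foldl_cons, List.foldl_nil, List.sum_append, List.sum_cons, List.sum_nil]
    by_cases h : PySem.Int.band ((2 : Int) ^ m) value = 0 <;>
      simp [stepA, h, pow_succ, mul_comm]

-- complementary if-sums add up to the plain sum
lemma sum_ite_compl (l : List Nat) (p : Nat → Prop) [DecidablePred p] (g : Nat → Int) :
    ((l.map fun i => if p i then g i else 0)).sum + ((l.map fun i => if p i then 0 else g i)).sum
      = (l.map g).sum := by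
  induction l with
  | nil => simp
  | cons a t ih => by_cases h : p a <;> simp [h] <;> omega

-- sum of the first n entries as an indexed sum
lemma take_sum (array : List Int) (n : Nat) (h : n ≤ array.length) :
    (array.take n).sum = ((List.range n).map (fun i : Nat => PySem.List.pyGetD array (i : Int) 0)).sum := by
  induction n with
  | zero => simp
  | succ m ih =>
    have hm : m < array.length := by omega
    rw [List.range_succ, List.map_append, List.sum_append, List.sum_take_succ array m hm,
      ih (by omega)]
    simp [PySem.List.pyGetD_natCast, List.getD, List.getElem?_eq_getElem hm]

-- a map-sum over List.range is a Finset.range sum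
lemma sum_map_range (n : Nat) (f : Nat → Int) :
    ((List.range n).map f).sum = ∑ i ∈ Finset.range n, f i := rfl

-- B's loop computes d plus twice the sum of array entries at the set-bit positions of v
lemma bloopB_eq (array : List Int) (n : Nat) : ∀ v : Nat, v < 2 ^ n → ∀ d : Int,
    bloopB array v d =
      d + 2 * ((List.range n).map (fun i : Nat => if v.testBit i then PySem.List.pyGetD array (i : Int) 0 else 0)).sum := by
  intro v
  induction v using Nat.strong_induction_on with
  | _ v IH =>
    intro hv d
    by_cases h0 : v = 0
    · subst h0; rw [bloopB]; simp
    · rw [bloopB]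
      simp only [h0, dite_false]
      set k := PySem.Int.bitLength (v : Int) - 1 with hk
      have hbl1 : 1 ≤ PySem.Int.bitLength (v : Int) := by
        by_contra hc
        have h0' : PySem.Int.bitLength (v : Int) = 0 := by omega
        have := PySem.Int.lt_two_pow_bitLength (v : Int)
        rw [h0'] at this
        simp [Int.natAbs_natCast] at this
        omega
      have hle : 2 ^ k ≤ v := by
        have := PySem.Int.two_pow_bitLength_le (v : Int) (by exact_mod_cast h0)
        simpa [hk, Int.natAbs_natCast] using this
      have hlt : v < 2 ^ (k + 1) := by
        have := PySem.Int.lt_two_pow_bitLength (v : Int)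
        have hkk : k + 1 = PySem.Int.bitLength (v : Int) := by omega
        rw [hkk]
        simpa [Int.natAbs_natCast] using this
      set r := v - 2 ^ k with hr
      have hvr : v = 2 ^ k + r := by omega
      have hrk : r < 2 ^ k := by
        have : (2:Nat) ^ (k+1) = 2 ^ k + 2 ^ k := by ring
        omega
      have hkn : k < n := by
        by_contra hc
        have : (2:Nat) ^ n ≤ 2 ^ k := Nat.pow_le_pow_right (by norm_num) (by omega)
        omega
      have hrn : r < 2 ^ n := by omega
      rw [IH r (by have := Nat.two_pow_pos k; omega) hrn]
      -- bits of v = bits of r plus bit k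
      have hbit : ∀ i : Nat, v.testBit i = (decide (i = k) || r.testBit i) := by
        intro i
        rcases lt_trichotomy i k with h | h | h
        · rw [hvr, Nat.testBit_two_pow_add_gt h]
          simp [Nat.ne_of_lt h]
        · subst h
          rw [hvr, Nat.testBit_two_pow_add_eq, Nat.testBit_lt_two_pow hrk]
          simp
        · have h1 : v.testBit i = false :=
            Nat.testBit_lt_two_pow (lt_of_lt_of_le hlt (Nat.pow_le_pow_right (by norm_num) (by omega)))
          have h2 : r.testBit i = false :=
            Nat.testBit_lt_two_pow (lt_of_lt_of_le hrk (Nat.pow_le_pow_right (by norm_num) (by omega)))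
          simp [h1, h2, Nat.ne_of_gt h]
      have hsum :
          ((List.range n).map (fun i : Nat => if v.testBit i then PySem.List.pyGetD array (i : Int) 0 else 0)).sum
            = PySem.List.pyGetD array (k : Int) 0
              + ((List.range n).map (fun i : Nat => if r.testBit i then PySem.List.pyGetD array (i : Int) 0 else 0)).sum := by
        rw [sum_map_range, sum_map_range]
        have : ∀ i ∈ Finset.range n,
            (if v.testBit i then PySem.List.pyGetD array (i : Int) 0 else 0)
              = (if i = k then PySem.List.pyGetD array (k : Int) 0 else 0)
                + (if r.testBit i then PySem.List.pyGetD array (i : Int) 0 else 0) := by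
          intro i _
          rw [hbit i]
          by_cases hik : i = k
          · subst hik
            simp [Nat.testBit_lt_two_pow (lt_of_lt_of_le hrk (Nat.pow_le_pow_right (by norm_num) (le_refl k)))]
          · simp [hik]
        rw [Finset.sum_congr rfl this, Finset.sum_add_distrib,
          Finset.sum_ite_eq' (Finset.range n) k (fun _ => PySem.List.pyGetD array (k : Int) 0)]
        simp [Finset.mem_range.mpr hkn]
      rw [hsum]; ring

-- bit i (i < n) of value mod 2^n is set exactly when A's mask test fires
lemma testBit_mod_band (value : Int) (n i : Nat) (hi : i < n) :
    (((PySem.Int.mod value ((2 : Int) ^ n)).toNat).testBit i = true)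
      ↔ ¬ (PySem.Int.band ((2 : Int) ^ i) value = 0) := by
  have hpos : (0 : Int) < 2 ^ n := by positivity
  rw [PySem.Int.mod_eq_emod_of_pos hpos]
  have h2i : ((2 : Int) ^ i) = ((2 ^ i : Nat) : Int) := by push_cast; ring
  by_cases hval : 0 ≤ value
  · -- nonnegative value: everything is the Nat computation
    have hw : (value % (2 : Int) ^ n).toNat = value.toNat % 2 ^ n := by
      rw [Int.toNat_emod hval (le_of_lt hpos)]
      congr 1
    rw [hw, Nat.testBit_mod_two_pow]
    have h2it : ((2 : Int) ^ i).toNat = 2 ^ i := by rw [h2i]; exact Int.toNat_natCast _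
    have hband : PySem.Int.band ((2 : Int) ^ i) value = ((2 ^ i &&& value.toNat : Nat) : Int) := by
      rw [PySem.Int.band_of_nonneg (by positivity) hval, h2it]
    rw [hband, Nat.two_pow_and]
    have h2ipos : 0 < 2 ^ i := Nat.two_pow_pos i
    cases hb : value.toNat.testBit i <;> simp [hb, hi, h2ipos.ne']
  · -- negative value: two's complement
    push_neg at hval
    set m : Nat := (-value - 1).toNat with hm
    have hmv : value = -((m : Int) + 1) := by
      have : ((-value - 1).toNat : Int) = -value - 1 := Int.toNat_of_nonneg (by omega)
      omega
    -- evaluate the band on the definition's (0 ≤ a, b < 0) branch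
    have hband : PySem.Int.band ((2 : Int) ^ i) value
        = ((2 ^ i - (2 ^ i &&& m) : Nat) : Int) := by
      show (if 0 ≤ (2 : Int) ^ i then
              if 0 ≤ value then (((((2:Int) ^ i).toNat &&& value.toNat : Nat)) : Int)
              else ((((2:Int) ^ i).toNat - (((2:Int) ^ i).toNat &&& (-value - 1).toNat) : Nat) : Int)
            else _) = _
      rw [if_pos (by positivity), if_neg (by omega)]
      congr 2
    -- value mod 2^n = 2^n - 1 - (m mod 2^n)
    have hmod : value % (2 : Int) ^ n = (2 : Int) ^ n - 1 - (m : Int) % (2 : Int) ^ n := by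
      have hsplit : (m : Int) % (2 : Int) ^ n + (2 : Int) ^ n * ((m : Int) / (2 : Int) ^ n) = (m : Int) :=
        Int.emod_add_ediv _ _
      have hvform : value = ((2 : Int) ^ n - 1 - (m : Int) % (2 : Int) ^ n)
          + (2 : Int) ^ n * (-(((m : Int) / (2 : Int) ^ n) + 1)) := by
        have key : (m : Int) % (2 : Int) ^ n = (m : Int) - (2 : Int) ^ n * ((m : Int) / (2 : Int) ^ n) := by
          linarith [hsplit]
        rw [hmv, key]; ring
      rw [hvform, Int.add_mul_emod_self_left]
      exact Int.emod_eq_of_lt (by have := Int.emod_lt_of_pos (m : Int) hpos; omega)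
        (by have := Int.emod_nonneg (m : Int) hpos.ne'; omega)
    have hmn : m % 2 ^ n < 2 ^ n := Nat.mod_lt _ (Nat.two_pow_pos n)
    have hw : (value % (2 : Int) ^ n).toNat = 2 ^ n - (m % 2 ^ n + 1) := by
      rw [hmod]
      have hc : ((m : Int)) % (2 : Int) ^ n = ((m % 2 ^ n : Nat) : Int) := by
        push_cast; ring
      have hcast : (((2 : Nat) ^ n : Nat) : Int) = (2 : Int) ^ n := by push_cast; ring
      rw [hc, ← hcast]
      omega
    rw [hw, Nat.testBit_two_pow_sub_succ hmn, Nat.testBit_mod_two_pow, hband, Nat.two_pow_and]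
    have h2ipos : 0 < 2 ^ i := Nat.two_pow_pos i
    cases hb : m.testBit i <;> simp [hb, hi, h2ipos.ne']

-- ===== VERDICT (by name: the statement is the Claim_ definition above) =====
theorem evaluatePartition_spec : Claim_equal_evaluatePartition := by
  intro value n array _ hpre
  unfold Spec_evaluatePartition evaluatePartition evaluatePartition_alt
  by_cases hn : n ≤ 0
  · have he : PySem.List.pyRange 0 n 1 = [] := by
      rw [List.eq_nil_iff_forall_not_mem]
      intro x hx
      have := (PySem.List.mem_pyRange_one.mp hx)
      omega
    simp [he, hn]
  · push_neg at hn
    obtain ⟨m, rfl⟩ : ∃ m : Nat, n = (m : Int) := ⟨n.toNat, (Int.toNat_of_nonneg (le_of_lt hn)).symm⟩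
    rw [PySem.List.pyRange_zero_natCast, foldA_range]
    simp only [if_neg (not_le.mpr hn)]
    unfold Pre_evaluatePartition at hpre
    have hmlen : m ≤ array.length := by exact_mod_cast hpre
    rw [PySem.List.slice_to array (Int.natCast_nonneg m), Int.toNat_natCast, take_sum array m hmlen]
    have hshift : ((1 : Int) <<< m) = (2 : Int) ^ m := by
      rw [Int.shiftLeft_eq]; ring
    rw [hshift]
    set w : Nat := (PySem.Int.mod value ((2 : Int) ^ m)).toNat with hwdef
    have hpos : (0 : Int) < 2 ^ m := by positivity
    have hwlt : w < 2 ^ m := by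
      have h1 := PySem.Int.mod_lt value hpos
      have h2 := PySem.Int.mod_nonneg value hpos
      rw [hwdef]
      have : ((2 : Int) ^ m) = ((2 ^ m : Nat) : Int) := by push_cast; ring
      omega
    rw [bloopB_eq array m w hwlt]
    -- the set-bit sum of w is A's one-sum
    have hsame :
        ((List.range m).map (fun i : Nat => if w.testBit i then PySem.List.pyGetD array (i : Int) 0 else 0)).sum
          = ((List.range m).map (fun i : Nat => if PySem.Int.band ((2 : Int) ^ i) value = 0 then 0 else PySem.List.pyGetD array (i : Int) 0)).sum := by
      apply congrArg
      apply List.map_congr_left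
      intro i hi
      have hi' : i < m := List.mem_range.mp hi
      have hb := testBit_mod_band value m i hi'
      by_cases hband : PySem.Int.band ((2 : Int) ^ i) value = 0
      · have : w.testBit i = false := by
          cases h : w.testBit i
          · rfl
          · exact absurd (hb.mp h) (by simpa using hband)
        simp [this, hband]
      · have : w.testBit i = true := by
          cases h : w.testBit i
          · exact absurd h (by
              intro hf
              have : ¬ (w.testBit i = true) := by simp [hf]
              exact this (hb.mpr hband))
          · rfl
        simp [this, hband]
    rw [hsame]
    have hsplit := sum_ite_compl (List.range m)
      (fun i => PySem.Int.band ((2 : Int) ^ i) value = 0)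
      (fun i => PySem.List.pyGetD array (i : Int) 0)
    simp only [] at hsplit ⊢
    split_ifs with h1 h2 h2 <;> first | rfl | omega
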